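-- pv_equiv track=rewrite | github.com/aurzenligl/study | ros-pkggraph/rospkggraph.py | make_dot
-- ===== SOURCE A (Python) =====
-- import itertools as it
--
-- def make_dot(deplist):
--     def node(dot, n):
--         dot.append(str(n))
--
--     def edge(dot, n1, n2):
--         dot.append('%s -> %s' % (n1, n2))
--
--     def wrap(dot, pre, post):
--         dot = [' ' * 4 + line for line in dot]
--         dot = [pre] + dot + [post]
--         return dot
--
--     by_choice = lambda x: x[1]
--     groups = it.groupby(sorted(deplist, key=by_choice), key=by_choice)
--
--     graph = []
--
--     for group in groups:
--         dot = []
--         for pkg, choice, deps in group[1]: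
--             node(dot, pkg)
--             for dep in deps:
--                 edge(dot, pkg, dep)
--         if graph:
--             graph.append('')
--         graph.extend(wrap(dot, 'subgraph cluster_%s {' % group[0], '}'))
--
--     graph = wrap(graph, 'digraph {', '}')
--     return '\n'.join(graph)
-- ===== SOURCE B (Python) =====
-- def make_dot(deplist):
--     # Emit flat cluster lines per sorted distinct choice (scanning deplist for
--     # each choice), with one relative indent level inside each subgraph; the
--     # whole body gets the outer indent in a single final pass.
--     body = []
--     for choice in sorted({choice for _, choice, _ in deplist}):
--         if body:
--             body.append('')
--         body.append('subgraph cluster_%s {' % choice)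
--         for pkg, c, deps in deplist:
--             if c == choice:
--                 body.append('    ' + pkg)
--                 body.extend('    %s -> %s' % (pkg, dep) for dep in deps)
--         body.append('}')
--     return '\n'.join(['digraph {'] + ['    ' + line for line in body] + ['}'])
-- ===== Notes on version B (the rewrite author's own statement) =====
-- stated objective: alternative
-- what changed: Instead of sorting all tuples and running itertools.groupby with nested wrap() indentation passes, B iterates the sorted distinct choice set, scans deplist once per choice to emit flat pre-indented cluster lines, and applies the outer indent in a single final pass.
import Mathlib
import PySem

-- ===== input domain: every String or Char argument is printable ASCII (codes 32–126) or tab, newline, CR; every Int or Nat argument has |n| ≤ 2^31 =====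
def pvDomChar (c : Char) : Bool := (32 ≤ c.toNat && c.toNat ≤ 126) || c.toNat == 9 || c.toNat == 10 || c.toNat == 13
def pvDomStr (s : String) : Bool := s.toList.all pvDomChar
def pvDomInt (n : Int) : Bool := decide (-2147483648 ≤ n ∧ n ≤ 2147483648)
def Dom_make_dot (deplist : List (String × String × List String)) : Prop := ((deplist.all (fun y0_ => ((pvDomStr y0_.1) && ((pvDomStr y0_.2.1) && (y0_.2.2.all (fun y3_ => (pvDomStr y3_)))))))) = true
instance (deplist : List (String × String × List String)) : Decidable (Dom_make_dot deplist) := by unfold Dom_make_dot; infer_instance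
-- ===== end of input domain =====

-- B drops the sort-everything + itertools.groupby + nested wrap() passes of A: it walks
-- the sorted distinct choices, scans deplist for each choice emitting flat pre-indented
-- cluster lines, and applies the outer indent in one final pass (alternative rewrite).

-- ===== PORT A =====
-- itertools.groupby over the (materialized) sorted list: maximal runs of
-- consecutive elements with equal key x[1]
def pvGroupby : List (String × String × List String) → List (String × List (String × String × List String))
  | [] => []
  | x :: xs =>
    match pvGroupby xs with
    | [] => [(x.2.1, [x])]
    | (k, g) :: rest =>
      if x.2.1 = k then (k, x :: g) :: rest
      else (x.2.1, [x]) :: (k, g) :: rest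

-- wrap(dot, pre, post)
def pvWrap (dot : List String) (pre post : String) : List String :=
  [pre] ++ dot.map (fun line => "    " ++ line) ++ [post]

def make_dot (deplist : List (String × String × List String)) : String :=
  PySem.Str.join "\n"
    (pvWrap
      ((pvGroupby (PySem.List.sorted deplist (fun x => x.2.1) false)).foldl
        (fun graph group =>
          (if graph = [] then graph else graph ++ [""]) ++
            pvWrap
              (group.2.foldl
                (fun dot pcd =>
                  pcd.2.2.foldl (fun dot dep => dot ++ [pcd.1 ++ " -> " ++ dep])
                    (dot ++ [pcd.1]))
                [])
              ("subgraph cluster_" ++ group.1 ++ " {") "}")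
        [])
      "digraph {" "}")

-- ===== PORT B =====
-- sorted({choice for _, choice, _ in deplist}): Python's set iteration order is
-- normalized by sorted, so PySem.Set.ofList of the key list, sorted, is exact.
def make_dot_alt (deplist : List (String × String × List String)) : String :=
  PySem.Str.join "\n"
    (["digraph {"] ++
      (((PySem.List.sorted (PySem.Set.ofList (deplist.map (fun x => x.2.1))) (fun k => k) false).foldl
          (fun body choice =>
            (deplist.foldl
              (fun body x =>
                if x.2.1 == choice then
                  (body ++ ["    " ++ x.1]) ++
                    x.2.2.map (fun dep => "    " ++ x.1 ++ " -> " ++ dep)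
                else body)
              ((if body = [] then body else body ++ [""]) ++
                ["subgraph cluster_" ++ choice ++ " {"]))
              ++ ["}"])
          []).map (fun line => "    " ++ line)) ++ ["}"])

-- ===== PRECONDITION & SPEC =====
def Spec_make_dot (deplist : List (String × String × List String)) (out : String) : Prop := out = make_dot_alt deplist
instance (deplist : List (String × String × List String)) (out : String) : Decidable (Spec_make_dot deplist out) := by unfold Spec_make_dot; infer_instance

-- ===== CLAIM (what is proved, stated in full; the proofs are below) =====
def Claim_equal_make_dot : Prop := ∀ (deplist : List (String × String × List String)), Dom_make_dot deplist → Spec_make_dot deplist (make_dot deplist)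

-- ===== LEMMAS AND PROOFS =====

-- the group of key k, in original order
def pvGrp (l : List (String × String × List String)) (k : String) : List (String × String × List String) :=
  l.filter (fun x => x.2.1 == k)

-- join a list of blocks with a single separator line s
def pvSep {α : Type} (s : String) (f : α → List String) : List α → List String
  | [] => []
  | x :: t => f x ++ t.flatMap (fun y => s :: f y)

-- A's per-group node/edge lines
def pvDot (g : List (String × String × List String)) : List String :=
  g.flatMap (fun x => x.1 :: x.2.2.map (fun dep => x.1 ++ " -> " ++ dep))

def pvFA (group : String × List (String × String × List String)) : List String :=
  pvWrap (pvDot group.2) ("subgraph cluster_" ++ group.1 ++ " {") "}"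

-- B's per-tuple lines (one relative indent level)
def pvMember (x : String × String × List String) : List String :=
  ("    " ++ x.1) :: x.2.2.map (fun dep => "    " ++ x.1 ++ " -> " ++ dep)

-- B's per-choice cluster block
def pvFB (l : List (String × String × List String)) (k : String) : List String :=
  ("subgraph cluster_" ++ k ++ " {") :: ((pvGrp l k).flatMap pvMember ++ ["}"])

-- separator-fold characterisation
theorem pvFoldSepAux {α : Type} (s : String) (f : α → List String) :
    ∀ (l : List α) (acc : List String), acc ≠ [] →
      l.foldl (fun acc x => (if acc = [] then acc else acc ++ [s]) ++ f x) acc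
        = acc ++ l.flatMap (fun y => s :: f y) := by
  intro l
  induction l with
  | nil => intro acc _; simp
  | cons x t ih =>
    intro acc hacc
    simp only [List.foldl_cons, if_neg hacc]
    rw [ih _ (by simp)]
    simp [List.append_assoc]

theorem pvFoldSep {α : Type} (s : String) (f : α → List String) (hf : ∀ x, f x ≠ [])
    (l : List α) :
    l.foldl (fun acc x => (if acc = [] then acc else acc ++ [s]) ++ f x) [] = pvSep s f l := by
  cases l with
  | nil => rfl
  | cons x t =>
    rw [List.foldl_cons,
      show ((if ([] : List String) = [] then ([] : List String) else [] ++ [s]) ++ f x)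
        = f x by simp]
    rw [pvFoldSepAux s f t (f x) (hf x)]
    rfl

theorem pvSep_mapArg {α β : Type} (s : String) (f : β → List String) (g : α → β)
    (l : List α) : pvSep s f (l.map g) = pvSep s (fun x => f (g x)) l := by
  cases l with
  | nil => rfl
  | cons x t => simp [pvSep, List.flatMap_map]

theorem pvSep_congr {α : Type} (s : String) (f g : α → List String) (l : List α)
    (h : ∀ x ∈ l, f x = g x) : pvSep s f l = pvSep s g l := by
  have hfm : ∀ (m : List α), (∀ x ∈ m, f x = g x) →
      m.flatMap (fun y => s :: f y) = m.flatMap (fun y => s :: g y) := by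
    intro m hm
    induction m with
    | nil => rfl
    | cons a b ihb =>
      simp only [List.flatMap_cons]
      rw [hm a (by simp), ihb (fun z hz => hm z (by simp [hz]))]
  cases l with
  | nil => rfl
  | cons x t =>
    simp only [pvSep]
    rw [h x (by simp), hfm t (fun z hz => h z (by simp [hz]))]

-- dedup of a (≤)-sorted list is (<)-sorted
theorem pv_ofList_pairwise_lt (l : List String) (h : l.Pairwise (· ≤ ·)) :
    (PySem.Set.ofList l).Pairwise (· < ·) := by
  induction l with
  | nil => exact List.Pairwise.nil
  | cons a t ih =>
    rw [List.pairwise_cons] at h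
    rw [PySem.Set.ofList_cons]
    refine List.Pairwise.cons ?_ ?_
    · intro b hb
      rw [PySem.Set.mem_discard] at hb
      exact lt_of_le_of_ne (h.1 b ((PySem.Set.mem_ofList t b).1 hb.1)) (Ne.symm hb.2)
    · show (List.filter (fun y => !y == a) (PySem.Set.ofList t)).Pairwise (· < ·)
      exact (ih h.2).sublist List.filter_sublist

-- dedup commutes with the stable sort on the key list
theorem pv_sorted_keys (l : List (String × String × List String)) :
    PySem.List.sorted (PySem.Set.ofList (l.map (fun x => x.2.1))) (fun k => k) false
      = PySem.Set.ofList ((PySem.List.sorted l (fun x => x.2.1) false).map (fun x => x.2.1)) := by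
  apply PySem.List.sorted_eq_of_perm_of_pairwise_lt
  · rw [List.perm_ext_iff_of_nodup (PySem.Set.nodup_ofList _) (PySem.Set.nodup_ofList _)]
    intro a
    simp only [PySem.Set.mem_ofList, List.mem_map, PySem.List.mem_sorted]
  · exact pv_ofList_pairwise_lt _ (PySem.List.sorted_map_key_pairwise l _)

-- stability: filtering one key class commutes with one stable insertion
theorem pv_insertBy_filter (x : String × String × List String) (k : String) :
    ∀ (ys : List (String × String × List String)),
      ys.Pairwise (fun a b => a.2.1 ≤ b.2.1) →
      (PySem.List.insertBy (fun a b => decide (a.2.1 < b.2.1)) x ys).filter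
          (fun z => z.2.1 == k)
        = ys.filter (fun z => z.2.1 == k) ++ (if x.2.1 == k then [x] else []) := by
  intro ys
  induction ys with
  | nil =>
    intro _
    by_cases hxk : x.2.1 == k <;> simp [PySem.List.insertBy, List.filter, hxk]
  | cons y t ih =>
    intro hp
    rw [List.pairwise_cons] at hp
    by_cases hlt : x.2.1 < y.2.1
    · have hins : PySem.List.insertBy (fun a b => decide (a.2.1 < b.2.1)) x (y :: t)
          = x :: y :: t := by simp [PySem.List.insertBy, hlt]
      rw [hins]
      by_cases hxk : x.2.1 = k
      · have hnil : (y :: t).filter (fun z => z.2.1 == k) = [] := by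
          rw [List.filter_eq_nil_iff]
          intro z hz
          have hyz : y.2.1 ≤ z.2.1 := by
            rcases List.mem_cons.1 hz with h1 | h1
            · exact le_of_eq (by rw [h1])
            · exact hp.1 z h1
          have hk : k < z.2.1 := lt_of_lt_of_le (hxk ▸ hlt) hyz
          simp only [beq_iff_eq]
          exact ne_of_gt hk
        rw [List.filter_cons_of_pos (by simp [hxk])]
        simp [hnil, hxk]
      · rw [List.filter_cons_of_neg (by simp [hxk])]
        simp [hxk]
    · have hins : PySem.List.insertBy (fun a b => decide (a.2.1 < b.2.1)) x (y :: t)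
          = y :: PySem.List.insertBy (fun a b => decide (a.2.1 < b.2.1)) x t := by
        simp [PySem.List.insertBy, hlt]
      rw [hins]
      rw [List.filter_cons, List.filter_cons, ih hp.2]
      by_cases hyk : y.2.1 == k <;> simp [hyk]

theorem pv_sorted_filter (l : List (String × String × List String)) (k : String) :
    (PySem.List.sorted l (fun x => x.2.1) false).filter (fun z => z.2.1 == k)
      = l.filter (fun z => z.2.1 == k) := by
  induction l using List.reverseRecOn with
  | nil => rfl
  | append_singleton xs x ih =>
    have hstep : PySem.List.sorted (xs ++ [x]) (fun z => z.2.1) false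
        = PySem.List.insertBy (fun a b => decide (a.2.1 < b.2.1)) x
            (PySem.List.sorted xs (fun z => z.2.1) false) := by
      rw [PySem.List.sorted_eq_foldl_insertBy, PySem.List.sorted_eq_foldl_insertBy,
        List.foldl_append]
      rfl
    rw [hstep, pv_insertBy_filter x k _ (PySem.List.sorted_pairwise xs _), ih,
      List.filter_append]
    congr 1
    by_cases hxk : x.2.1 == k <;> simp [List.filter, hxk]

theorem pvGroupby_cons (x : String × String × List String)
    (xs : List (String × String × List String)) :
    pvGroupby (x :: xs) = match pvGroupby xs with
      | [] => [(x.2.1, [x])]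
      | (k, g) :: rest =>
        if x.2.1 = k then (k, x :: g) :: rest
        else (x.2.1, [x]) :: (k, g) :: rest := rfl

-- groupby of a key-sorted list = one group per distinct key, in dedup order
theorem pv_groupby_sorted :
    ∀ (l : List (String × String × List String)),
      l.Pairwise (fun a b => a.2.1 ≤ b.2.1) →
      pvGroupby l = (PySem.Set.ofList (l.map (fun x => x.2.1))).map
        (fun k => (k, l.filter (fun x => x.2.1 == k))) := by
  intro l
  induction l with
  | nil => intro _; rfl
  | cons x t ih =>
    intro hp
    rw [List.pairwise_cons] at hp
    have ihv := ih hp.2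
    cases t with
    | nil =>
      simp [pvGroupby, PySem.Set.ofList_cons, PySem.Set.ofList_nil, PySem.Set.discard,
        List.filter]
    | cons y t' =>
      have hordt : ∀ z ∈ y :: t', y.2.1 ≤ z.2.1 := by
        intro z hz
        rcases List.mem_cons.1 hz with h1 | h1
        · exact le_of_eq (by rw [h1])
        · exact (List.pairwise_cons.1 hp.2).1 z h1
      have hofl : PySem.Set.ofList ((y :: t').map (fun z => z.2.1))
          = y.2.1 :: (PySem.Set.ofList (t'.map (fun z => z.2.1))).discard y.2.1 := by
        rw [List.map_cons, PySem.Set.ofList_cons]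
      have hDmem : ∀ b ∈ (PySem.Set.ofList (t'.map (fun z => z.2.1))).discard y.2.1,
          b ∈ t'.map (fun z => z.2.1) ∧ b ≠ y.2.1 := by
        intro b hb
        rw [PySem.Set.mem_discard] at hb
        exact ⟨(PySem.Set.mem_ofList _ b).1 hb.1, hb.2⟩
      have ihv' : pvGroupby (y :: t')
          = (y.2.1, (y :: t').filter (fun z => z.2.1 == y.2.1)) ::
            ((PySem.Set.ofList (t'.map (fun z => z.2.1))).discard y.2.1).map
              (fun k => (k, (y :: t').filter (fun z => z.2.1 == k))) := by
        rw [ihv, hofl, List.map_cons]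
      have hstep : pvGroupby (x :: y :: t')
          = if x.2.1 = y.2.1 then
              (y.2.1, x :: (y :: t').filter (fun z => z.2.1 == y.2.1)) ::
                ((PySem.Set.ofList (t'.map (fun z => z.2.1))).discard y.2.1).map
                  (fun k => (k, (y :: t').filter (fun z => z.2.1 == k)))
            else
              (x.2.1, [x]) :: (y.2.1, (y :: t').filter (fun z => z.2.1 == y.2.1)) ::
                ((PySem.Set.ofList (t'.map (fun z => z.2.1))).discard y.2.1).map
                  (fun k => (k, (y :: t').filter (fun z => z.2.1 == k))) := by
        rw [pvGroupby_cons, ihv']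
      rw [hstep, List.map_cons, PySem.Set.ofList_cons, hofl]
      by_cases hxy : x.2.1 = y.2.1
      · rw [if_pos hxy]
        have hd1 : PySem.Set.discard
            (y.2.1 :: (PySem.Set.ofList (t'.map (fun z => z.2.1))).discard y.2.1) x.2.1
            = (PySem.Set.ofList (t'.map (fun z => z.2.1))).discard y.2.1 := by
          show List.filter _ _ = _
          rw [List.filter_cons_of_neg (by simp [hxy])]
          rw [List.filter_eq_self]
          intro b hb
          simp [hxy, (hDmem b hb).2]
        rw [hd1, List.map_cons]
        congr 1
        · simp [hxy]
        · apply List.map_congr_left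
          intro b hb
          have hbx : (x.2.1 == b) = false := by
            rw [hxy]
            exact beq_eq_false_iff_ne.mpr (Ne.symm (hDmem b hb).2)
          simp [List.filter_cons, hbx]
      · rw [if_neg hxy]
        have hxlt : x.2.1 < y.2.1 := lt_of_le_of_ne (hp.1 y (by simp)) hxy
        have hxne : ∀ z ∈ y :: t', x.2.1 ≠ z.2.1 := by
          intro z hz
          exact ne_of_lt (lt_of_lt_of_le hxlt (hordt z hz))
        have hd2 : PySem.Set.discard
            (y.2.1 :: (PySem.Set.ofList (t'.map (fun z => z.2.1))).discard y.2.1) x.2.1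
            = y.2.1 :: (PySem.Set.ofList (t'.map (fun z => z.2.1))).discard y.2.1 := by
          show List.filter _ _ = _
          rw [List.filter_cons_of_pos (by simp [Ne.symm hxy])]
          congr 1
          rw [List.filter_eq_self]
          intro b hb
          have hbmem : b ∈ (y :: t').map (fun z => z.2.1) := by
            rw [List.map_cons]
            exact List.mem_cons_of_mem _ (hDmem b hb).1
          rcases List.mem_map.1 hbmem with ⟨z, hz, hzb⟩
          have : x.2.1 ≠ b := hzb ▸ hxne z hz
          simp [Ne.symm this]
        rw [hd2, List.map_cons, List.map_cons]
        refine List.cons_eq_cons.mpr ⟨?_, List.cons_eq_cons.mpr ⟨?_, ?_⟩⟩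
        · have hfilt : (y :: t').filter (fun z => z.2.1 == x.2.1) = [] := by
            rw [List.filter_eq_nil_iff]
            intro z hz
            simp only [beq_iff_eq]
            exact Ne.symm (hxne z hz)
          simp [hfilt]
        · have hxyb : (x.2.1 == y.2.1) = false := beq_eq_false_iff_ne.mpr hxy
          simp [hxyb]
        · apply List.map_congr_left
          intro b hb
          have hbmem : b ∈ (y :: t').map (fun z => z.2.1) := by
            rw [List.map_cons]
            exact List.mem_cons_of_mem _ (hDmem b hb).1
          rcases List.mem_map.1 hbmem with ⟨z, hz, hzb⟩
          have hbx : (x.2.1 == b) = false :=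
            beq_eq_false_iff_ne.mpr (hzb ▸ hxne z hz)
          simp [List.filter_cons, hbx]

-- A's group lines, indented once = B's per-tuple lines
theorem pv_dot_map1 (g : List (String × String × List String)) :
    (pvDot g).map (fun line => "    " ++ line) = g.flatMap pvMember := by
  induction g with
  | nil => rfl
  | cons x t ih =>
    simp only [pvDot, List.flatMap_cons, List.map_append, List.map_cons, List.map_map]
      at ih ⊢
    rw [ih]
    simp [pvMember, Function.comp, String.append_assoc]

-- A's wrapped cluster = B's cluster block (on the same group)
theorem pv_cluster (g : List (String × String × List String)) (k : String) :
    pvFA (k, g) = ("subgraph cluster_" ++ k ++ " {") :: (g.flatMap pvMember ++ ["}"]) := by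
  simp only [pvFA, pvWrap, List.cons_append, List.nil_append]
  rw [pv_dot_map1]

-- conditional extend fold = filter + flatMap
theorem pv_foldl_if_flatMap {α : Type} (p : α → Bool) (g : α → List String) :
    ∀ (l : List α) (acc : List String),
      l.foldl (fun acc x => if p x then acc ++ g x else acc) acc
        = acc ++ (l.filter p).flatMap g := by
  intro l
  induction l with
  | nil => intro acc; simp
  | cons x t ih =>
    intro acc
    simp only [List.foldl_cons, List.filter_cons]
    by_cases hx : p x
    · rw [if_pos hx, hx, ih]
      simp [List.append_assoc]
    · rw [if_neg hx, ih]
      simp [hx]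

-- normal form of A
theorem pv_A_norm (dl : List (String × String × List String)) :
    make_dot dl = PySem.Str.join "\n"
      (pvWrap (pvSep "" pvFA (pvGroupby (PySem.List.sorted dl (fun x => x.2.1) false)))
        "digraph {" "}") := by
  unfold make_dot
  have hinner : ∀ (g2 : List (String × String × List String)),
      g2.foldl
        (fun dot pcd =>
          pcd.2.2.foldl (fun dot dep => dot ++ [pcd.1 ++ " -> " ++ dep]) (dot ++ [pcd.1]))
        [] = pvDot g2 := by
    intro g2
    have hc : ∀ (acc : List String), ∀ pcd ∈ g2,
        pcd.2.2.foldl (fun dot dep => dot ++ [pcd.1 ++ " -> " ++ dep]) (acc ++ [pcd.1])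
          = acc ++ (pcd.1 :: pcd.2.2.map (fun dep => pcd.1 ++ " -> " ++ dep)) := by
      intro acc pcd _
      rw [PySem.List.foldl_append_singleton_eq_map]
      simp [List.append_assoc]
    rw [PySem.List.foldl_congr_mem g2
      (fun dot pcd =>
        pcd.2.2.foldl (fun dot dep => dot ++ [pcd.1 ++ " -> " ++ dep]) (dot ++ [pcd.1]))
      (fun dot pcd => dot ++ (pcd.1 :: pcd.2.2.map (fun dep => pcd.1 ++ " -> " ++ dep)))
      [] hc]
    rw [PySem.List.foldl_append_eq_flatMap]
    simp [pvDot]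
  have hfA : ∀ gp, pvFA gp ≠ [] := by
    intro gp
    simp [pvFA, pvWrap]
  have hcA : ∀ (acc : List String),
      ∀ gp ∈ pvGroupby (PySem.List.sorted dl (fun x => x.2.1) false),
      ((if acc = [] then acc else acc ++ [""]) ++
          pvWrap
            (gp.2.foldl
              (fun dot pcd =>
                pcd.2.2.foldl (fun dot dep => dot ++ [pcd.1 ++ " -> " ++ dep])
                  (dot ++ [pcd.1]))
              [])
            ("subgraph cluster_" ++ gp.1 ++ " {") "}")
        = (if acc = [] then acc else acc ++ [""]) ++ pvFA gp := by
    intro acc gp _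
    rw [hinner gp.2]
    rfl
  rw [PySem.List.foldl_congr_mem (pvGroupby (PySem.List.sorted dl (fun x => x.2.1) false))
    (fun graph group =>
      (if graph = [] then graph else graph ++ [""]) ++
        pvWrap
          (group.2.foldl
            (fun dot pcd =>
              pcd.2.2.foldl (fun dot dep => dot ++ [pcd.1 ++ " -> " ++ dep])
                (dot ++ [pcd.1]))
            [])
          ("subgraph cluster_" ++ group.1 ++ " {") "}")
    (fun graph group => (if graph = [] then graph else graph ++ [""]) ++ pvFA group)
    [] hcA]
  rw [pvFoldSep "" pvFA hfA]

-- normal form of B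
theorem pv_B_norm (dl : List (String × String × List String)) :
    make_dot_alt dl = PySem.Str.join "\n"
      (["digraph {"] ++
        (pvSep "" (pvFB dl)
          (PySem.List.sorted (PySem.Set.ofList (dl.map (fun x => x.2.1))) (fun k => k) false)).map
          (fun line => "    " ++ line) ++ ["}"]) := by
  unfold make_dot_alt
  have hinner : ∀ (choice : String) (init : List String),
      dl.foldl
        (fun body x =>
          if x.2.1 == choice then
            (body ++ ["    " ++ x.1]) ++
              x.2.2.map (fun dep => "    " ++ x.1 ++ " -> " ++ dep)
          else body)
        init = init ++ (pvGrp dl choice).flatMap pvMember := by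
    intro choice init
    have hc : ∀ (acc : List String), ∀ x ∈ dl,
        (if x.2.1 == choice then
            (acc ++ ["    " ++ x.1]) ++
              x.2.2.map (fun dep => "    " ++ x.1 ++ " -> " ++ dep)
          else acc)
          = (if x.2.1 == choice then acc ++ pvMember x else acc) := by
      intro acc x _
      by_cases hx : x.2.1 == choice
      · rw [if_pos hx, if_pos hx]
        simp [pvMember, List.append_assoc]
      · rw [if_neg hx, if_neg hx]
    rw [PySem.List.foldl_congr_mem dl _ _ init hc,
      pv_foldl_if_flatMap (fun x => x.2.1 == choice) pvMember dl init]
    rfl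
  have hfB : ∀ k, pvFB dl k ≠ [] := by
    intro k
    simp [pvFB]
  have hcB : ∀ (acc : List String),
      ∀ c ∈ PySem.List.sorted (PySem.Set.ofList (dl.map (fun x => x.2.1))) (fun k => k) false,
      ((dl.foldl
          (fun body x =>
            if x.2.1 == c then
              (body ++ ["    " ++ x.1]) ++
                x.2.2.map (fun dep => "    " ++ x.1 ++ " -> " ++ dep)
            else body)
          ((if acc = [] then acc else acc ++ [""]) ++
            ["subgraph cluster_" ++ c ++ " {"])) ++ ["}"])
        = (if acc = [] then acc else acc ++ [""]) ++ pvFB dl c := by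
    intro acc c _
    rw [hinner c]
    simp [pvFB, List.append_assoc]
  rw [PySem.List.foldl_congr_mem _ _ _ ([] : List String) hcB]
  rw [pvFoldSep "" (pvFB dl) hfB]

theorem pv_main (dl : List (String × String × List String)) :
    make_dot dl = make_dot_alt dl := by
  rw [pv_A_norm, pv_B_norm]
  simp only [pvWrap]
  rw [pv_groupby_sorted (PySem.List.sorted dl (fun x => x.2.1) false)
    (PySem.List.sorted_pairwise dl (fun x => x.2.1)), ← pv_sorted_keys]
  rw [pvSep_mapArg]
  have hc : ∀ k ∈ PySem.List.sorted (PySem.Set.ofList (dl.map (fun x => x.2.1)))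
      (fun k => k) false,
      pvFA (k, (PySem.List.sorted dl (fun x => x.2.1) false).filter
          (fun x => x.2.1 == k))
        = pvFB dl k := by
    intro k _
    rw [pv_cluster, pv_sorted_filter]
    rfl
  rw [pvSep_congr "" _ _ _ hc]

-- ===== VERDICT (by name: the statement is the Claim_ definition above) =====
theorem make_dot_spec : Claim_equal_make_dot := by
  intro dl _
  exact pv_main dl
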